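-- pv_equiv track=rewrite | github.com/chenshanghao/Interview_preparation | Company/Amazon/Lintcode_806/learning_solution.py | buyFruits
-- ===== SOURCE A (Python) =====
-- def buyFruits(codeList, shoppingCart):
--     # Write your code here
--     newCodeList = []
--     for itemList in codeList:
--         newCodeList += itemList
--     lenCodeList, lenShoppingCart = len(newCodeList), len(shoppingCart)
--     if lenCodeList > lenShoppingCart:
--         return 0
--
--     for i in range(lenShoppingCart - lenCodeList + 1):
--         idx = 0
--         for j in range(lenCodeList):
--             if newCodeList[j] == shoppingCart[j + i] or newCodeList[j] == 'anything':
--                 idx += 1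
--             else:
--                 idx = -1
--                 break
--         if idx == -1:
--             continue
--         else:
--             return 1
--     return 0
-- ===== SOURCE B (Python) =====
-- def buyFruits(codeList, shoppingCart):
--     pattern = [item for group in codeList for item in group]
--     m = len(pattern)
--     if m == 0:
--         return 1
--     # one pass over the cart; active holds the lengths j of the pattern prefixes
--     # that match the items read most recently (a naive NFA state set)
--     active = []
--     for item in shoppingCart:
--         nxt = []
--         for j in active + [0]:
--             p = pattern[j]
--             if p == item or p == 'anything':
--                 if j + 1 == m:
--                     return 1
--                 nxt.append(j + 1)
--         active = nxt
--     return 0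
-- ===== Notes on version B (the rewrite author's own statement) =====
-- stated objective: alternative
-- what changed: Replaces A's index arithmetic over two nested range() loops (with an explicit window-offset i, a counter idx and break/continue control flow) by structural recursion over the cart's suffixes with a wildcard prefix test; no indices, no counters, no length guard.
import Mathlib
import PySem

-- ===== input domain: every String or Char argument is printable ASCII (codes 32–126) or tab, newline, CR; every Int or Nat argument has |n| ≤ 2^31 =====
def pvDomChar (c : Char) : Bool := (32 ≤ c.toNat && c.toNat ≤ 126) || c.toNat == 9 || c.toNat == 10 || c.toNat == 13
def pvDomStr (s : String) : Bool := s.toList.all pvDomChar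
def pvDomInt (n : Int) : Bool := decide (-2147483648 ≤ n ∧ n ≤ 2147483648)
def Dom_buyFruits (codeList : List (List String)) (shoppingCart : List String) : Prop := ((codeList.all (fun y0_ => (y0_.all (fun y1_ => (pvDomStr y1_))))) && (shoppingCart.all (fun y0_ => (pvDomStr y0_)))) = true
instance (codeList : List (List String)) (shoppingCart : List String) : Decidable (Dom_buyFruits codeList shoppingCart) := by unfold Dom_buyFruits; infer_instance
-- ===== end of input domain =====

-- B replaces A's restart-per-window nested index loops by a single left-to-right pass over the
-- cart that maintains the set of live partial-match lengths (a naive NFA scan); alternative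
-- decomposition, same worst-case asymptotic cost.

-- ===== PORT A =====
-- inner 'for j in range(lenCodeList)' loop, state idx; break is the -1 return
def pvA_window (nc sc : List String) (i : Int) : Int → List Int → Int
  | idx, [] => idx
  | idx, j :: js =>
    match PySem.List.pyGet? nc j, PySem.List.pyGet? sc (j + i) with
    | some a, some b =>
      if a = b ∨ a = "anything" then pvA_window nc sc i (idx + 1) js
      else -1
    | _, _ => -1  -- IndexError; unreachable for A's in-range loop indices

-- outer 'for i in range(...)' loop with its continue / return 1
def pvA_outer (nc sc : List String) : List Int → Int
  | [] => 0
  | i :: is =>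
    let idx := pvA_window nc sc i 0 (PySem.List.pyRange 0 (nc.length : Int) 1)
    if idx = -1 then pvA_outer nc sc is else 1

def buyFruits (codeList : List (List String)) (shoppingCart : List String) : Int :=
  let newCodeList := codeList.foldl (fun acc l => acc ++ l) []
  let lenCodeList : Int := newCodeList.length
  let lenShoppingCart : Int := shoppingCart.length
  if lenCodeList > lenShoppingCart then 0
  else pvA_outer newCodeList shoppingCart (PySem.List.pyRange 0 (lenShoppingCart - lenCodeList + 1) 1)

-- ===== PORT B =====
-- inner 'for j in active + [0]' loop building nxt; 'none' is Source B's early 'return 1'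
def pvB_feed (P : List String) (m : Nat) (item : String) : List Nat → Option (List Nat)
  | [] => some []
  | j :: js =>
    match PySem.List.pyGet? P (j : Int) with
    | some p =>
      if p = item ∨ p = "anything" then
        if j + 1 = m then none
        else
          match pvB_feed P m item js with
          | none => none
          | some nxt => some ((j + 1) :: nxt)
      else pvB_feed P m item js
    | none => some []  -- IndexError; unreachable: every state j kept is < m = P.length

-- outer 'for item in shoppingCart' loop, state active
def pvB_scan (P : List String) (m : Nat) : List Nat → List String → Int
  | _, [] => 0
  | active, item :: rest =>
    match pvB_feed P m item (active ++ [0]) with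
    | none => 1
    | some nxt => pvB_scan P m nxt rest

def buyFruits_alt (codeList : List (List String)) (shoppingCart : List String) : Int :=
  let pattern := codeList.flatMap id
  let m := pattern.length
  if m = 0 then 1 else pvB_scan pattern m [] shoppingCart

-- ===== PRECONDITION & SPEC =====
def Spec_buyFruits (codeList : List (List String)) (shoppingCart : List String) (out : Int) : Prop := out = buyFruits_alt codeList shoppingCart
instance (codeList : List (List String)) (shoppingCart : List String) (out : Int) : Decidable (Spec_buyFruits codeList shoppingCart out) := by unfold Spec_buyFruits; infer_instance

-- ===== CLAIM (what is proved, stated in full; the proofs are below) =====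
def Claim_equal_buyFruits : Prop := ∀ (codeList : List (List String)) (shoppingCart : List String), Dom_buyFruits codeList shoppingCart → Spec_buyFruits codeList shoppingCart (buyFruits codeList shoppingCart)

-- ===== LEMMAS AND PROOFS =====

-- token a of the pattern matches cart item b
def pvMt (a b : String) : Prop := a = b ∨ a = "anything"

-- pattern position j (in range) matches the item
def pvMT (P : List String) (j : Nat) (item : String) : Prop :=
  ∃ a, P[j]? = some a ∧ pvMt a item

-- the last j elements of done match the first j pattern tokens
def pvTail (P done : List String) (j : Nat) : Prop :=
  ∃ u v, done = u ++ v ∧ v.length = j ∧ List.Forall₂ pvMt (P.take j) v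

-- some full-pattern window of done ++ rest ends strictly inside rest
def pvWinEnd (P done rest : List String) : Prop :=
  ∃ u w v, done ++ rest = u ++ w ++ v ∧ List.Forall₂ pvMt P w ∧ done.length < u.length + P.length

lemma pvFlatten_eq (l : List (List String)) :
    ∀ acc, l.foldl (fun acc l => acc ++ l) acc = acc ++ l.flatMap id := by
  induction l with
  | nil => intro acc; simp [List.foldl]
  | cons x xs ih => intro acc; simp [List.foldl, ih, List.flatMap_cons]

-- ---- A-side characterization ----

def pvGood (nc sc : List String) (i j : Int) : Prop :=
  ∃ a b, PySem.List.pyGet? nc j = some a ∧ PySem.List.pyGet? sc (j + i) = some b ∧ pvMt a b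

lemma pvWindow_spec (nc sc : List String) (i : Int) :
    ∀ (js : List Int) (idx : Int), 0 ≤ idx →
      (pvA_window nc sc i idx js = -1 ↔ ∃ j ∈ js, ¬ pvGood nc sc i j) := by
  intro js
  induction js with
  | nil => intro idx h; simp [pvA_window]; omega
  | cons j js ih =>
    intro idx h
    by_cases hg : pvGood nc sc i j
    · obtain ⟨a, b, ha, hb, hab⟩ := hg
      simp only [pvA_window, ha, hb]
      rw [if_pos (show a = b ∨ a = "anything" from hab)]
      rw [ih (idx + 1) (by omega)]
      constructor
      · rintro ⟨j', hj', hg'⟩; exact ⟨j', List.mem_cons_of_mem _ hj', hg'⟩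
      · rintro ⟨j', hj', hg'⟩
        rcases List.mem_cons.mp hj' with rfl | hmem
        · exact absurd ⟨a, b, ha, hb, hab⟩ hg'
        · exact ⟨j', hmem, hg'⟩
    · constructor
      · intro _; exact ⟨j, List.mem_cons_self, hg⟩
      · intro _
        simp only [pvA_window]
        match h1 : PySem.List.pyGet? nc j, h2 : PySem.List.pyGet? sc (j + i) with
        | some a, some b =>
          have : ¬ (a = b ∨ a = "anything") := fun hab => hg ⟨a, b, h1, h2, hab⟩
          simp [this]
        | none, _ => rfl
        | some _, none => rfl

lemma pvWindowAt (nc sc : List String) (k : Nat) :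
    (pvA_window nc sc (k : Int) 0 (PySem.List.pyRange 0 (nc.length : Int) 1) = -1)
      ↔ ∃ jn : Nat, jn < nc.length ∧ ¬ pvGood nc sc (k : Int) (jn : Int) := by
  rw [pvWindow_spec nc sc (k : Int) _ 0 le_rfl]
  constructor
  · rintro ⟨j, hj, hg⟩
    rw [PySem.List.mem_pyRange_one] at hj
    refine ⟨j.toNat, by omega, ?_⟩
    rwa [Int.toNat_of_nonneg hj.1]
  · rintro ⟨jn, hjn, hg⟩
    exact ⟨(jn : Int), PySem.List.mem_pyRange_one.mpr ⟨by omega, by omega⟩, hg⟩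

lemma pvGood_iff (nc sc : List String) (k jn : Nat) :
    pvGood nc sc (k : Int) (jn : Int)
      ↔ ∃ a b, nc[jn]? = some a ∧ sc[k + jn]? = some b ∧ pvMt a b := by
  unfold pvGood
  have h : ((jn : Int) + (k : Int)) = ((k + jn : Nat) : Int) := by push_cast; ring
  rw [h]
  simp only [PySem.List.pyGet?_natCast]

-- index form of "some window matches"
def pvEIdx (nc sc : List String) : Prop :=
  ∃ k : Nat, k + nc.length ≤ sc.length ∧
    ∀ j < nc.length, ∃ a b, nc[j]? = some a ∧ sc[k + j]? = some b ∧ pvMt a b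

lemma pvOuter_spec (nc sc : List String) :
    ∀ js : List Int,
      (pvA_outer nc sc js = 0 ∨ pvA_outer nc sc js = 1) ∧
      (pvA_outer nc sc js = 1 ↔
        ∃ i ∈ js, pvA_window nc sc i 0 (PySem.List.pyRange 0 (nc.length : Int) 1) ≠ -1) := by
  intro js
  induction js with
  | nil =>
    refine ⟨Or.inl rfl, ?_⟩
    simp [pvA_outer]
  | cons i is ih =>
    by_cases h : pvA_window nc sc i 0 (PySem.List.pyRange 0 (nc.length : Int) 1) = -1
    · have e : pvA_outer nc sc (i :: is) = pvA_outer nc sc is := by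
        simp [pvA_outer, h]
      rw [e]
      refine ⟨ih.1, ?_⟩
      rw [ih.2]
      constructor
      · rintro ⟨i', hi', hne⟩; exact ⟨i', List.mem_cons_of_mem _ hi', hne⟩
      · rintro ⟨i', hi', hne⟩
        rcases List.mem_cons.mp hi' with rfl | hmem
        · exact absurd h hne
        · exact ⟨i', hmem, hne⟩
    · have e : pvA_outer nc sc (i :: is) = 1 := by simp [pvA_outer, h]
      rw [e]
      exact ⟨Or.inr rfl, fun _ => ⟨i, List.mem_cons_self, h⟩, fun _ => rfl⟩

lemma pvExists_iff (nc sc : List String) (_hle : nc.length ≤ sc.length) :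
    ((∃ i ∈ PySem.List.pyRange 0 ((sc.length : Int) - (nc.length : Int) + 1) 1,
        pvA_window nc sc i 0 (PySem.List.pyRange 0 (nc.length : Int) 1) ≠ -1)
      ↔ pvEIdx nc sc) := by
  constructor
  · rintro ⟨i, hi, hne⟩
    rw [PySem.List.mem_pyRange_one] at hi
    obtain ⟨hi0, hi1⟩ := hi
    set k := i.toNat with hk
    have hik : i = (k : Int) := by omega
    rw [hik, Ne, pvWindowAt] at hne
    push Not at hne
    refine ⟨k, by omega, ?_⟩
    intro j hj
    have := hne j hj
    rwa [pvGood_iff] at this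
  · rintro ⟨k, hk, hall⟩
    refine ⟨(k : Int), PySem.List.mem_pyRange_one.mpr ⟨by omega, by omega⟩, ?_⟩
    rw [Ne, pvWindowAt]
    push Not
    intro jn hjn
    rw [pvGood_iff]
    exact hall jn hjn

-- ---- generic list facts ----

lemma pvSnoc_inj {α : Type} (xs ys : List α) (x y : α) (h : xs ++ [x] = ys ++ [y]) :
    xs = ys ∧ x = y := by
  have := List.append_inj' h (by simp)
  exact ⟨this.1, by simpa using this.2⟩

lemma pvForall₂_snoc (R : String → String → Prop) (xs ys : List String) (x y : String) :
    List.Forall₂ R (xs ++ [x]) (ys ++ [y]) ↔ List.Forall₂ R xs ys ∧ R x y := by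
  rw [← List.forall₂_reverse_iff]
  simp only [List.reverse_append, List.reverse_singleton, List.singleton_append,
    List.forall₂_cons, List.forall₂_reverse_iff]
  tauto

lemma pvTake_snoc (P : List String) (j : Nat) (hj : j < P.length) :
    P.take (j + 1) = P.take j ++ [P[j]] := by
  rw [List.take_add_one]
  simp [List.getElem?_eq_getElem hj]

-- ---- pvTail facts ----

lemma pvTail_zero (P done : List String) : pvTail P done 0 :=
  ⟨done, [], by simp, rfl, by simp⟩

lemma pvTail_nil (P : List String) (j : Nat) (h : pvTail P [] j) : j = 0 := by
  obtain ⟨u, v, heq, hlen, _⟩ := h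
  have : v = [] := by
    cases u <;> simp_all
  simp [this] at hlen
  omega

lemma pvTail_snoc (P done : List String) (item : String) (j : Nat) (hj : j < P.length) :
    pvTail P (done ++ [item]) (j + 1) ↔ (pvTail P done j ∧ pvMT P j item) := by
  constructor
  · rintro ⟨u, v, heq, hlen, hf⟩
    rcases (List.eq_nil_or_concat' v) with rfl | ⟨v', last, rfl⟩
    · simp at hlen
    rw [← List.append_assoc] at heq
    obtain ⟨heq1, heq2⟩ := pvSnoc_inj done (u ++ v') item last heq
    have hlen' : v'.length = j := by simpa using hlen
    rw [pvTake_snoc P j hj] at hf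
    have hf2 := (pvForall₂_snoc pvMt (P.take j) v' P[j] last).mp hf
    refine ⟨⟨u, v', heq1, hlen', hf2.1⟩,
      ⟨P[j], by simp [List.getElem?_eq_getElem hj], heq2 ▸ hf2.2⟩⟩
  · rintro ⟨⟨u, v, heq, hlen, hf⟩, ⟨a, ha, hmt⟩⟩
    have ha' : P[j] = a := by simpa [List.getElem?_eq_getElem hj] using ha
    refine ⟨u, v ++ [item], by simp [heq], by simp [hlen], ?_⟩
    rw [pvTake_snoc P j hj]
    exact (pvForall₂_snoc pvMt (P.take j) v P[j] item).mpr ⟨hf, ha' ▸ hmt⟩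

lemma pvTail_full (P done : List String) (item : String) (hm : 0 < P.length) :
    pvTail P (done ++ [item]) P.length ↔
      (pvTail P done (P.length - 1) ∧ pvMT P (P.length - 1) item) := by
  have h1 : P.length - 1 + 1 = P.length := by omega
  rw [← h1]
  exact pvTail_snoc P done item (P.length - 1) (by omega)

-- ---- feed characterization ----

lemma pvMT_iff (P : List String) (j : Nat) (item : String) (hj : j < P.length) :
    pvMT P j item ↔ pvMt P[j] item := by
  simp [pvMT, List.getElem?_eq_getElem hj]

lemma pvFeed_spec (P : List String) (m : Nat) (item : String) :
    ∀ js : List Nat, (∀ j ∈ js, j < P.length) →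
      ((pvB_feed P m item js = none ↔ ∃ j ∈ js, j + 1 = m ∧ pvMT P j item) ∧
       ∀ nxt, pvB_feed P m item js = some nxt →
         ∀ j', (j' ∈ nxt ↔ ∃ j ∈ js, j' = j + 1 ∧ j + 1 ≠ m ∧ pvMT P j item)) := by
  intro js
  induction js with
  | nil =>
    intro _
    refine ⟨by simp [pvB_feed], ?_⟩
    intro nxt h j'
    simp only [pvB_feed, Option.some.injEq] at h
    simp [← h]
  | cons j js ih =>
    intro hall
    have hj : j < P.length := hall j List.mem_cons_self
    have hjs : ∀ x ∈ js, x < P.length := fun x hx => hall x (List.mem_cons_of_mem _ hx)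
    obtain ⟨ihn, ihs⟩ := ih hjs
    have hget : PySem.List.pyGet? P (j : Int) = some P[j] := by
      simp [PySem.List.pyGet?_natCast, List.getElem?_eq_getElem hj]
    by_cases hmt : P[j] = item ∨ P[j] = "anything"
    · by_cases hm : j + 1 = m
      · have e : pvB_feed P m item (j :: js) = none := by
          simp [pvB_feed, hget, hmt, hm]
        rw [e]
        refine ⟨?_, ?_⟩
        · constructor
          · intro _
            exact ⟨j, List.mem_cons_self, hm, (pvMT_iff P j item hj).mpr hmt⟩
          · intro _; rfl
        · intro nxt h; cases h
      · cases hrec : pvB_feed P m item js with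
        | none =>
          have e : pvB_feed P m item (j :: js) = none := by
            simp [pvB_feed, hget, hmt, hm, hrec]
          rw [e]
          refine ⟨?_, ?_⟩
          · constructor
            · intro _
              obtain ⟨j2, hj2, hm2, hmt2⟩ := ihn.mp hrec
              exact ⟨j2, List.mem_cons_of_mem _ hj2, hm2, hmt2⟩
            · intro _; rfl
          · intro nxt h; cases h
        | some nxt' =>
          have e : pvB_feed P m item (j :: js) = some ((j + 1) :: nxt') := by
            simp [pvB_feed, hget, hmt, hm, hrec]
          rw [e]
          refine ⟨?_, ?_⟩
          · constructor
            · intro h; cases h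
            · rintro ⟨j2, hj2, hm2, hmt2⟩
              rcases List.mem_cons.mp hj2 with rfl | hmem
              · exact absurd hm2 hm
              · exact absurd (ihn.mpr ⟨j2, hmem, hm2, hmt2⟩) (by simp [hrec])
          · intro nxt h j'
            injection h with h; subst h
            rw [List.mem_cons, ihs nxt' hrec j']
            constructor
            · rintro (rfl | ⟨j2, hj2, rfl, hm2, hmt2⟩)
              · exact ⟨j, List.mem_cons_self, rfl, hm, (pvMT_iff P j item hj).mpr hmt⟩
              · exact ⟨j2, List.mem_cons_of_mem _ hj2, rfl, hm2, hmt2⟩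
            · rintro ⟨j2, hj2, rfl, hm2, hmt2⟩
              rcases List.mem_cons.mp hj2 with rfl | hmem
              · exact Or.inl rfl
              · exact Or.inr ⟨j2, hmem, rfl, hm2, hmt2⟩
    · have hmt' : ¬ pvMT P j item := fun h => hmt ((pvMT_iff P j item hj).mp h)
      have e : pvB_feed P m item (j :: js) = pvB_feed P m item js := by
        simp [pvB_feed, hget, hmt]
      rw [e]
      refine ⟨?_, ?_⟩
      · rw [ihn]
        constructor
        · rintro ⟨j2, hj2, hm2, hmt2⟩
          exact ⟨j2, List.mem_cons_of_mem _ hj2, hm2, hmt2⟩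
        · rintro ⟨j2, hj2, hm2, hmt2⟩
          rcases List.mem_cons.mp hj2 with rfl | hmem
          · exact absurd hmt2 hmt'
          · exact ⟨j2, hmem, hm2, hmt2⟩
      · intro nxt h j'
        rw [ihs nxt h j']
        constructor
        · rintro ⟨j2, hj2, rfl, hm2, hmt2⟩
          exact ⟨j2, List.mem_cons_of_mem _ hj2, rfl, hm2, hmt2⟩
        · rintro ⟨j2, hj2, rfl, hm2, hmt2⟩
          rcases List.mem_cons.mp hj2 with rfl | hmem
          · exact absurd hmt2 hmt'
          · exact ⟨j2, hmem, rfl, hm2, hmt2⟩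

-- "the window ends exactly on this item" ↔ feed returns the early-exit signal
lemma pvFeed_none_iff (P done : List String) (item : String) (active : List Nat)
    (hm : 0 < P.length)
    (hinv : ∀ j, j ∈ active ↔ (1 ≤ j ∧ j < P.length ∧ pvTail P done j)) :
    pvB_feed P P.length item (active ++ [0]) = none ↔
      pvTail P (done ++ [item]) P.length := by
  have hS : ∀ j ∈ active ++ [0], j < P.length := by
    intro j hj
    rcases List.mem_append.mp hj with h | h
    · exact ((hinv j).mp h).2.1
    · simp at h; omega
  rw [(pvFeed_spec P P.length item (active ++ [0]) hS).1, pvTail_full P done item hm]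
  constructor
  · rintro ⟨j, hjS, hjm, hmt⟩
    have hj : j = P.length - 1 := by omega
    subst hj
    refine ⟨?_, hmt⟩
    rcases List.mem_append.mp hjS with h | h
    · exact ((hinv _).mp h).2.2
    · simp at h
      rw [h]
      exact pvTail_zero P done
  · rintro ⟨htail, hmt⟩
    refine ⟨P.length - 1, ?_, by omega, hmt⟩
    by_cases h0 : P.length - 1 = 0
    · rw [h0]; simp
    · exact List.mem_append.mpr (Or.inl ((hinv _).mpr ⟨by omega, by omega, htail⟩))

-- peel one cart item off the "some window ends in rest" predicate
lemma pvWinEnd_cons (P done rest : List String) (item : String) (_hm : 0 < P.length) :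
    pvWinEnd P done (item :: rest) ↔
      (pvTail P (done ++ [item]) P.length ∨ pvWinEnd P (done ++ [item]) rest) := by
  constructor
  · rintro ⟨u, w, v, heq, hf, hlt⟩
    have hw : w.length = P.length := hf.length_eq.symm
    have hlens : done.length + rest.length + 1 = u.length + w.length + v.length := by
      have := congrArg List.length heq
      simp at this
      omega
    by_cases hend : u.length + P.length = done.length + 1
    · left
      have h2 : (u ++ w) ++ v = (done ++ [item]) ++ rest := by
        rw [List.append_assoc, List.append_assoc, List.singleton_append]
        exact ((heq.trans (List.append_assoc u w v))).symm
      obtain ⟨h3, _⟩ := List.append_inj h2 (by simp; omega)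
      exact ⟨u, w, h3.symm, hw, by rwa [List.take_length]⟩
    · right
      refine ⟨u, w, v, ?_, hf, by simp; omega⟩
      rw [List.append_assoc, List.singleton_append]
      exact heq
  · rintro (h | h)
    · obtain ⟨u, w, heq, hlen, hf⟩ := h
      refine ⟨u, w, rest, ?_, ?_, ?_⟩
      · rw [← heq]; simp
      · rwa [List.take_length] at hf
      · have := congrArg List.length heq
        simp at this
        omega
    · obtain ⟨u, w, v, heq, hf, hlt⟩ := h
      refine ⟨u, w, v, by simpa using heq, hf, by simp at hlt; omega⟩

lemma pvWinEnd_nil_rest (P done : List String) : ¬ pvWinEnd P done [] := by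
  rintro ⟨u, w, v, heq, hf, hlt⟩
  have hw : P.length = w.length := hf.length_eq
  have := congrArg List.length heq
  simp at this
  omega

-- ---- scan characterization ----

lemma pvScan_spec (P : List String) (hm : 0 < P.length) :
    ∀ (rest done : List String) (active : List Nat),
      (∀ j, j ∈ active ↔ (1 ≤ j ∧ j < P.length ∧ pvTail P done j)) →
      ((pvB_scan P P.length active rest = 0 ∨ pvB_scan P P.length active rest = 1) ∧
       (pvB_scan P P.length active rest = 1 ↔ pvWinEnd P done rest)) := by
  intro rest
  induction rest with
  | nil =>
    intro done active _
    refine ⟨Or.inl rfl, ?_⟩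
    simp only [pvB_scan]
    constructor
    · intro h; exact absurd h (by norm_num)
    · intro h; exact absurd h (pvWinEnd_nil_rest P done)
  | cons item rest ih =>
    intro done active hinv
    have hS : ∀ j ∈ active ++ [0], j < P.length := by
      intro j hj
      rcases List.mem_append.mp hj with h | h
      · exact ((hinv j).mp h).2.1
      · simp at h; omega
    cases hfd : pvB_feed P P.length item (active ++ [0]) with
    | none =>
      have e : pvB_scan P P.length active (item :: rest) = 1 := by
        simp [pvB_scan, hfd]
      rw [e]
      refine ⟨Or.inr rfl, ?_, fun _ => rfl⟩
      intro _
      rw [pvWinEnd_cons P done rest item hm]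
      exact Or.inl ((pvFeed_none_iff P done item active hm hinv).mp hfd)
    | some nxt =>
      have e : pvB_scan P P.length active (item :: rest) = pvB_scan P P.length nxt rest := by
        simp [pvB_scan, hfd]
      rw [e]
      have hinv' : ∀ j', j' ∈ nxt ↔ (1 ≤ j' ∧ j' < P.length ∧ pvTail P (done ++ [item]) j') := by
        intro j'
        rw [(pvFeed_spec P P.length item (active ++ [0]) hS).2 nxt hfd j']
        constructor
        · rintro ⟨j, hjS, rfl, hm2, hmt⟩
          have hj : j < P.length := hS j hjS
          have htail : pvTail P done j := by
            rcases List.mem_append.mp hjS with h | h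
            · exact ((hinv j).mp h).2.2
            · simp at h; rw [h]; exact pvTail_zero P done
          exact ⟨by omega, by omega, (pvTail_snoc P done item j hj).mpr ⟨htail, hmt⟩⟩
        · rintro ⟨h1, h2, htail⟩
          obtain ⟨j, rfl⟩ : ∃ j, j' = j + 1 := ⟨j' - 1, by omega⟩
          have hj : j < P.length := by omega
          obtain ⟨htail', hmt⟩ := (pvTail_snoc P done item j hj).mp htail
          refine ⟨j, ?_, rfl, by omega, hmt⟩
          by_cases h0 : j = 0
          · rw [h0]; simp
          · exact List.mem_append.mpr (Or.inl ((hinv j).mpr ⟨by omega, hj, htail'⟩))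
      obtain ⟨h01, hiff⟩ := ih (done ++ [item]) nxt hinv'
      refine ⟨h01, ?_⟩
      rw [hiff, pvWinEnd_cons P done rest item hm]
      have hne : ¬ pvTail P (done ++ [item]) P.length := by
        intro h
        exact absurd ((pvFeed_none_iff P done item active hm hinv).mpr h) (by simp [hfd])
      tauto

-- ---- bridging the two characterizations ----

lemma pvWinEnd_nil_iff (P sc : List String) (hm : 0 < P.length) :
    pvWinEnd P [] sc ↔ pvEIdx P sc := by
  constructor
  · rintro ⟨u, w, v, heq, hf, _⟩
    simp only [List.nil_append] at heq
    have hw : P.length = w.length := hf.length_eq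
    have hlen : u.length + P.length ≤ sc.length := by
      have := congrArg List.length heq
      simp at this
      omega
    refine ⟨u.length, hlen, ?_⟩
    intro j hj
    have hjw : j < w.length := by omega
    refine ⟨P[j], w[j], by simp [List.getElem?_eq_getElem hj], ?_, ?_⟩
    · have heq' : sc = u ++ (w ++ v) := by rw [heq, List.append_assoc]
      rw [heq', List.getElem?_append_right (show u.length ≤ u.length + j by omega)]
      rw [Nat.add_sub_cancel_left, List.getElem?_append_left hjw]
      simp [List.getElem?_eq_getElem hjw]
    · obtain ⟨hle, hget⟩ := List.forall₂_iff_get.mp hf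
      exact hget j hj hjw
  · rintro ⟨k, hk, hall⟩
    refine ⟨sc.take k, (sc.drop k).take P.length, sc.drop (k + P.length), ?_, ?_, by simp; omega⟩
    · rw [List.nil_append]
      have e2 : (sc.drop k).drop P.length = sc.drop (k + P.length) := by
        rw [List.drop_drop]

      rw [← e2, List.append_assoc, List.take_append_drop, List.take_append_drop]
    · rw [List.forall₂_iff_get]
      have hwl : ((sc.drop k).take P.length).length = P.length := by
        simp; omega
      refine ⟨by omega, ?_⟩
      intro i h1 h2
      obtain ⟨a, b, ha, hb, hmt⟩ := hall i h1
      have ha' : P[i] = a := by simpa [List.getElem?_eq_getElem h1] using ha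
      have hkb : k + i < sc.length := by omega
      have hb' : sc[k + i] = b := by simpa [List.getElem?_eq_getElem hkb] using hb
      have : ((sc.drop k).take P.length).get ⟨i, h2⟩ = sc[k + i] := by
        simp [List.getElem_take, List.getElem_drop]
      simp only [List.get_eq_getElem] at this ⊢
      rw [this, ha', hb']
      exact hmt

-- ===== VERDICT (by name: the statement is the Claim_ definition above) =====
theorem buyFruits_spec : Claim_equal_buyFruits := by
  intro codeList shoppingCart _
  unfold Spec_buyFruits buyFruits buyFruits_alt
  have hfl : codeList.foldl (fun acc l => acc ++ l) [] = codeList.flatMap id := by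
    rw [pvFlatten_eq]; simp
  rw [hfl]
  set nc := codeList.flatMap id
  set sc := shoppingCart
  by_cases hm0 : nc.length = 0
  · -- empty pattern: both return 1
    rw [if_pos hm0, if_neg (by omega : ¬ ((nc.length : Int) > (sc.length : Int)))]
    obtain ⟨_, hA1⟩ := pvOuter_spec nc sc
      (PySem.List.pyRange 0 ((sc.length : Int) - (nc.length : Int) + 1) 1)
    apply hA1.mpr
    refine ⟨0, PySem.List.mem_pyRange_one.mpr ⟨le_rfl, by omega⟩, ?_⟩
    have hr : PySem.List.pyRange 0 ((nc.length : Int)) 1 = [] := by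
      rw [PySem.List.pyRange_one_eq_nil (by omega)]
    rw [hr]
    norm_num [pvA_window]
  · have hm : 0 < nc.length := by omega
    rw [if_neg hm0]
    have hinv0 : ∀ j, j ∈ ([] : List Nat) ↔ (1 ≤ j ∧ j < nc.length ∧ pvTail nc [] j) := by
      intro j
      simp only [List.not_mem_nil, false_iff]
      rintro ⟨h1, _, htail⟩
      have := pvTail_nil nc j htail
      omega
    obtain ⟨hB01, hB1⟩ := pvScan_spec nc hm sc [] [] hinv0
    rw [pvWinEnd_nil_iff nc sc hm] at hB1
    by_cases hlen : (nc.length : Int) > (sc.length : Int)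
    · rw [if_pos hlen]
      rcases hB01 with h0 | h1
      · exact h0.symm
      · exfalso
        obtain ⟨k, hk, _⟩ := hB1.mp h1
        omega
    · rw [if_neg hlen]
      obtain ⟨hA01, hA1⟩ := pvOuter_spec nc sc
        (PySem.List.pyRange 0 ((sc.length : Int) - (nc.length : Int) + 1) 1)
      have hle : nc.length ≤ sc.length := by omega
      have hiff := (hA1.trans (pvExists_iff nc sc hle)).trans hB1.symm
      rcases hA01 with hA | hA <;> rcases hB01 with hB | hB
      · rw [hA, hB]
      · exact absurd (hiff.mpr hB) (by rw [hA]; norm_num)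
      · exact absurd (hiff.mp hA) (by rw [hB]; norm_num)
      · rw [hA, hB]
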